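-- pv_equiv track=rewrite | github.com/manuel-fischer/LAB | validate.py | identifier_tokens
-- ===== SOURCE A (Python) =====
-- def find_next(str, pos, patterns):
--     f_min = -1
--     pat = None
--     for p in patterns:
--         f = str.find(p, pos)
--         if f == -1: continue
--         if pat is None or f < f_min:
--             f_min = f
--             pat = p
--
--     return f_min, pat
--
-- def advance(ij, string):
--     i, j = ij
--     if "\n" in string:
--         i += string.count("\n")
--         j = string.rfind("\n")+1
--     else:
--         j += len(string)
--     return i, j
--
-- def advance_i(ij, linecount):
--     i, j = ij
--     if linecount != 0:
--         i += linecount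
--         j = 1
--     return i, j
--
-- def advance_j(ij, rowcount):
--     i, j = ij
--     return i, j+rowcount
--
-- def remove_comments_seg(c):
--     ij = 1,1
--
--     p = 0
--     while True:
--         f, pat = find_next(c, p, ["/*", "//"])
--         if f == -1: break
--
--         yield c[p:f] + " ", ij
--         pp = p
--         if pat == "/*":
--             p = c.find("*/", f+2)
--             assert p != -1
--             p+=2
--         else:
--             p = c.find("\n", f+2)
--             if p == -1: p = len(c)
--         ij = advance(ij, c[pp:p])
--
--     yield c[p:], ij
--
-- def split_lines_seg(segments):
--     for s, ij in segments:
--         for i, l in enumerate(s.splitlines()):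
--             yield l, advance_i(ij, i)
--
-- def identifier_tokens(c):
--     c_seg = remove_comments_seg(c)
--
--     for l, ij in split_lines_seg(c_seg):
--         w = ""
--         for j, c in enumerate(l):
--             w2 = w+c
--             if w2.isidentifier():
--                 w = w2
--             else:
--                 if w: yield (w, advance_j(ij, j-len(w)))
--                 w = ""
--         if w: yield (w, advance_j(ij, j-len(w)+1))
-- ===== SOURCE B (Python) =====
-- # B: single-pass token scanner per line (start/continue character classes) instead of
-- # re-testing the growing prefix with isidentifier(); direct two-find comment search
-- # instead of the generator pipeline with find_next over a pattern list.
-- # Position bookkeeping follows the same rule as A's `advance` helper (it is the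
-- # observable position convention of the function).
--
-- def _advance(ij, string):
--     i, j = ij
--     if "\n" in string:
--         i += string.count("\n")
--         j = string.rfind("\n") + 1
--     else:
--         j += len(string)
--     return i, j
--
-- def identifier_tokens(c):
--     ij = (1, 1)
--     p = 0
--     while True:
--         fb = c.find('/*', p)
--         fl = c.find('//', p)
--         f = fb if fl == -1 else fl if fb == -1 else min(fb, fl)
--         seg = c[p:] if f == -1 else c[p:f]
--         for i, line in enumerate(seg.splitlines()):
--             li, lj = (ij[0] + i, 1) if i else ij
--             w_start = -1
--             for j, ch in enumerate(line):
--                 if (ch.isalnum() or ch == '_') if w_start >= 0 else (ch.isalpha() or ch == '_'):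
--                     if w_start < 0:
--                         w_start = j
--                 else:
--                     if w_start >= 0:
--                         yield (line[w_start:j], (li, lj + w_start))
--                     w_start = -1
--             if w_start >= 0:
--                 yield (line[w_start:], (li, lj + w_start))
--         if f == -1:
--             return
--         if f == fb:
--             e = c.find('*/', f + 2)
--             # unterminated block comment: treat it as running to the end
--             # (A asserts there; such inputs are outside Pre_)
--             p2 = len(c) if e == -1 else e + 2
--         else:
--             e = c.find('\n', f + 2)
--             p2 = len(c) if e == -1 else e
--         ij = _advance(ij, c[p:p2])
--         p = p2
-- ===== Notes on version B (the rewrite author's own statement) =====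
-- stated objective: faster
-- what changed: Tokenization scans each line once with per-character start/continue classes and slices the token out by index, instead of re-testing the growing prefix with isidentifier() per character; the comment search uses two direct find() calls and min instead of the find_next pattern loop, and the generator pipeline is collapsed into one loop (positions follow A's advance rule).
-- outside the precondition, e.g. on identifier_tokens('/*'): A raises AssertionError, B returns []
import Mathlib
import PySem

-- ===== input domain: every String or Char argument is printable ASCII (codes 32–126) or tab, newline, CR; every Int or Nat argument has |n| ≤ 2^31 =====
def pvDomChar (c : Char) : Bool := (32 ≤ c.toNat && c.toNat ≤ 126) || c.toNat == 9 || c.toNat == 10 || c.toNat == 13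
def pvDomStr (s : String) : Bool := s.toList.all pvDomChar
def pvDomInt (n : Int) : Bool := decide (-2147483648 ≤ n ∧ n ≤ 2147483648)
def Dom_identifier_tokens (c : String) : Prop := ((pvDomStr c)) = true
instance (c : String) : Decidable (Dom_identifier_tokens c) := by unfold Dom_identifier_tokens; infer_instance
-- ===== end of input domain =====

-- B replaces the per-token growing-prefix isidentifier() re-scan by a one-pass
-- per-character start/continue scan and the find_next pattern loop by two direct
-- finds; positions (A's `advance` rule) and results are proved identical on Pre_.

-- ===== PORT A =====

-- Python str.isidentifier(), hand-ported: exact on the ASCII domain Dom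
-- (identifier start = letter or '_', continue = letter, digit or '_').
def pvIdentStart (ch : Char) : Bool := PySem.Chars.isalpha ch || ch == '_'
def pvIdentCont (ch : Char) : Bool := PySem.Chars.isalnum ch || ch == '_'
def pvIsIdentifier (w : List Char) : Bool :=
  match w with
  | [] => false
  | ch :: rest => pvIdentStart ch && rest.all pvIdentCont

-- find_next(str, pos, patterns)
def pvFindNext (s : List Char) (pos : Int) (patterns : List (List Char)) : Int × Option (List Char) :=
  patterns.foldl
    (fun (st : Int × Option (List Char)) p =>
      let f := PySem.Chars.findFrom s p pos
      if f = -1 then st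
      else if st.2 = none ∨ f < st.1 then (f, some p)
      else st)
    (-1, none)

-- advance(ij, string)  (Source B's _advance is the identical position rule, so both
-- ports share this helper)
def pvAdvance (ij : Int × Int) (s : List Char) : Int × Int :=
  if PySem.Chars.isIn ['\n'] s then
    (ij.1 + (PySem.Chars.count s ['\n'] : Int), PySem.Chars.rfind s ['\n'] + 1)
  else (ij.1, ij.2 + s.length)

-- advance_i(ij, linecount)
def pvAdvanceI (ij : Int × Int) (linecount : Int) : Int × Int :=
  if linecount ≠ 0 then (ij.1 + linecount, 1) else ij

-- advance_j(ij, rowcount)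
def pvAdvanceJ (ij : Int × Int) (rowcount : Int) : Int × Int := (ij.1, ij.2 + rowcount)

-- remove_comments_seg(c): the while-loop as fuel recursion; p advances by at
-- least 2 per iteration, so fuel = len+1 never runs out on inputs in Pre_.
-- On an unterminated "/*" Python asserts (outside Pre_); the port just continues.
def pvRemoveCommentsSeg (cs : List Char) : Nat → Int → Int × Int → List (List Char × (Int × Int))
  | 0, _, _ => []
  | fuel+1, p, ij =>
    let fp := pvFindNext cs p [['/','*'], ['/','/']]
    if fp.1 = -1 then [(PySem.List.slice cs (some p) none, ij)]
    else
      let p2 : Int :=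
        if fp.2 = some ['/','*'] then
          PySem.Chars.findFrom cs ['*','/'] (fp.1 + 2) + 2
        else
          let e := PySem.Chars.findFrom cs ['\n'] (fp.1 + 2)
          if e = -1 then (cs.length : Int) else e
      (PySem.List.slice cs (some p) (some fp.1) ++ [' '], ij)
        :: pvRemoveCommentsSeg cs fuel p2 (pvAdvance ij (PySem.List.slice cs (some p) (some p2)))

-- split_lines_seg(segments)
def pvSplitLinesSeg (segs : List (List Char × (Int × Int))) : List (List Char × (Int × Int)) :=
  segs.flatMap (fun sij =>
    (PySem.List.enumerate (PySem.Chars.splitlines sij.1) 0).map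
      (fun il => (il.2, pvAdvanceI sij.2 il.1)))

-- the inner `for j, c in enumerate(l)` step of identifier_tokens
def pvLineAstep (ij : Int × Int) (st : List Char × Int × List (String × (Int × Int)))
    (jc : Int × Char) : List Char × Int × List (String × (Int × Int)) :=
  let w2 := st.1 ++ [jc.2]
  if pvIsIdentifier w2 then (w2, jc.1, st.2.2)
  else if st.1 ≠ [] then
    ([], jc.1, st.2.2 ++ [(String.ofList st.1, pvAdvanceJ ij (jc.1 - st.1.length))])
  else ([], jc.1, st.2.2)

-- one line of identifier_tokens (w := ""; loop; trailing flush); Python's leftover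
-- loop variable j is carried in the state (initial 0 is unobservable: w starts "").
def pvLineA (l : List Char) (ij : Int × Int) (acc : List (String × (Int × Int))) :
    List (String × (Int × Int)) :=
  let st := (PySem.List.enumerate l 0).foldl (pvLineAstep ij) ([], 0, acc)
  if st.1 ≠ [] then
    st.2.2 ++ [(String.ofList st.1, pvAdvanceJ ij (st.2.1 - st.1.length + 1))]
  else st.2.2

def identifier_tokens (c : String) : List (String × (Int × Int)) :=
  let cs := c.toList
  (pvSplitLinesSeg (pvRemoveCommentsSeg cs (cs.length + 1) 0 (1, 1))).foldl
    (fun acc lij => pvLineA lij.1 lij.2 acc) []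

-- ===== PORT B =====

-- Source B's inner `for j, ch in enumerate(line)` step: token tracked by start index
def pvLineBstep (l : List Char) (li lj : Int)
    (st : Int × List (String × (Int × Int))) (jc : Int × Char) :
    Int × List (String × (Int × Int)) :=
  if (if 0 ≤ st.1 then pvIdentCont jc.2 else pvIdentStart jc.2) then
    (if st.1 < 0 then jc.1 else st.1, st.2)
  else
    (-1, if 0 ≤ st.1 then
            st.2 ++ [(String.ofList (PySem.List.slice l (some st.1) (some jc.1)), (li, lj + st.1))]
         else st.2)

-- one line of Source B (w_start := -1; loop; trailing flush)
def pvLineB (l : List Char) (li lj : Int) (acc : List (String × (Int × Int))) :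
    List (String × (Int × Int)) :=
  let st := (PySem.List.enumerate l 0).foldl (pvLineBstep l li lj) (-1, acc)
  if 0 ≤ st.1 then
    st.2 ++ [(String.ofList (PySem.List.slice l (some st.1) none), (li, lj + st.1))]
  else st.2

-- Source B's `for i, line in enumerate(seg.splitlines())`
def pvSegTokB (seg : List Char) (ij : Int × Int) (acc : List (String × (Int × Int))) :
    List (String × (Int × Int)) :=
  (PySem.List.enumerate (PySem.Chars.splitlines seg) 0).foldl
    (fun acc il =>
      let lilj := if il.1 ≠ 0 then (ij.1 + il.1, (1 : Int)) else ij
      pvLineB il.2 lilj.1 lilj.2 acc) acc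

-- Source B's main while-loop (fuel recursion, same bound as port A's loop)
def pvLoopB (cs : List Char) : Nat → Int → Int × Int → List (String × (Int × Int)) →
    List (String × (Int × Int))
  | 0, _, _, acc => acc
  | fuel+1, p, ij, acc =>
    let fb := PySem.Chars.findFrom cs ['/','*'] p
    let fl := PySem.Chars.findFrom cs ['/','/'] p
    let f := if fl = -1 then fb else if fb = -1 then fl else min fb fl
    let seg := if f = -1 then PySem.List.slice cs (some p) none
               else PySem.List.slice cs (some p) (some f)
    let acc2 := pvSegTokB seg ij acc
    if f = -1 then acc2
    else
      let p2 : Int :=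
        if f = fb then
          let e := PySem.Chars.findFrom cs ['*','/'] (f + 2)
          if e = -1 then (cs.length : Int) else e + 2
        else
          let e := PySem.Chars.findFrom cs ['\n'] (f + 2)
          if e = -1 then (cs.length : Int) else e
      pvLoopB cs fuel p2 (pvAdvance ij (PySem.List.slice cs (some p) (some p2))) acc2

def identifier_tokens_alt (c : String) : List (String × (Int × Int)) :=
  let cs := c.toList
  pvLoopB cs (cs.length + 1) 0 (1, 1) []

-- ===== PRECONDITION & SPEC =====

-- Comment-structure DFA used only to STATE the precondition (a character-level
-- grammar, not A's find-based scan): states 0 = code, 1 = code after '/',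
-- 2 = line comment, 3 = block comment, 4 = block comment after '*'.
def pvCommentStep (m : Nat) (ch : Char) : Nat :=
  if m = 0 then (if ch = '/' then 1 else 0)
  else if m = 1 then (if ch = '*' then 3 else if ch = '/' then 2 else 0)
  else if m = 2 then (if ch = '\n' then 0 else 2)
  else if m = 3 then (if ch = '*' then 4 else 3)
  else (if ch = '/' then 0 else if ch = '*' then 4 else 3)

-- true iff the scan does not end inside a block comment
def pvCommentOk (m : Nat) : List Char → Bool
  | [] => !(m == 3 || m == 4)
  | ch :: rest => pvCommentOk (pvCommentStep m ch) rest

-- A's `assert` fires (AssertionError) exactly when the code reaches an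
-- unterminated "/*" block comment outside a line comment; Pre_ excludes exactly
-- those inputs (every other input is admitted); B returns there (the comment is
-- treated as running to the end of the input).
def Pre_identifier_tokens (c : String) : Prop := pvCommentOk 0 c.toList = true
instance (c : String) : Decidable (Pre_identifier_tokens c) := by
  unfold Pre_identifier_tokens; infer_instance

def pvWitness_identifier_tokens : String := "a /* x\ny */ b\nc // d"

def Spec_identifier_tokens (c : String) (out : List (String × (Int × Int))) : Prop :=
  out = identifier_tokens_alt c
instance (c : String) (out : List (String × (Int × Int))) : Decidable (Spec_identifier_tokens c out) := by
  unfold Spec_identifier_tokens; infer_instance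

-- ===== CLAIM (what is proved, stated in full; the proofs are below) =====
def Claim_equal_identifier_tokens : Prop :=
  ∀ (c : String), Dom_identifier_tokens c → Pre_identifier_tokens c →
    Spec_identifier_tokens c (identifier_tokens c)

-- ===== LEMMAS AND PROOFS =====

-- reference one-line scanner both line tokenizers are proved equal to
def pvLineC (li lj : Int) : List Char → Int → List Char → List (String × (Int × Int)) →
    List (String × (Int × Int))
  | [], j, w, acc =>
    if w ≠ [] then acc ++ [(String.ofList w, (li, lj + j - w.length))] else acc
  | ch :: rest, j, w, acc =>
    if (if w = [] then pvIdentStart ch else pvIdentCont ch) then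
      pvLineC li lj rest (j + 1) (w ++ [ch]) acc
    else
      pvLineC li lj rest (j + 1) []
        (if w ≠ [] then acc ++ [(String.ofList w, (li, lj + j - w.length))] else acc)

-- tokens of a list of lines, with A's advance_i position rule
def pvTokLines (lines : List (List Char)) (ij : Int × Int) : List (String × (Int × Int)) :=
  (PySem.List.enumerate lines 0).flatMap
    (fun il => pvLineC (pvAdvanceI ij il.1).1 (pvAdvanceI ij il.1).2 il.2 0 [] [])

theorem pvIdentStep (w : List Char) (ch : Char) (h : w = [] ∨ pvIsIdentifier w = true) :
    pvIsIdentifier (w ++ [ch]) = (if w = [] then pvIdentStart ch else pvIdentCont ch) := by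
  rcases h with h | h
  · subst h; simp [pvIsIdentifier]
  · cases w with
    | nil => simp [pvIsIdentifier] at h
    | cons c rest =>
      simp only [pvIsIdentifier, Bool.and_eq_true, List.all_eq_true] at h
      obtain ⟨h1, h2⟩ := h
      simp [pvIsIdentifier, List.all_append, h1, List.all_eq_true.mpr h2]

theorem pvLineC_acc (li lj : Int) (rest : List Char) : ∀ (j : Int) (w : List Char)
    (acc acc' : List (String × (Int × Int))),
    pvLineC li lj rest j w (acc ++ acc') = acc ++ pvLineC li lj rest j w acc' := by
  induction rest with
  | nil =>
    intro j w acc acc'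
    simp only [pvLineC]
    split <;> simp
  | cons ch rest ih =>
    intro j w acc acc'
    simp only [pvLineC]
    by_cases h : (if w = [] then pvIdentStart ch else pvIdentCont ch) = true
    · rw [if_pos h, if_pos h]; exact ih _ _ _ _
    · rw [if_neg h, if_neg h]
      by_cases hw : w = []
      · simp only [ne_eq, hw, not_true_eq_false, if_false]
        exact ih _ _ _ _
      · simp only [ne_eq, hw, not_false_eq_true, if_true]
        rw [List.append_assoc]
        exact ih _ _ _ _

theorem pvLineC_space (li lj : Int) (rest : List Char) : ∀ (j : Int) (w : List Char)
    (acc : List (String × (Int × Int))),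
    pvLineC li lj (rest ++ [' ']) j w acc = pvLineC li lj rest j w acc := by
  induction rest with
  | nil =>
    intro j w acc
    simp only [List.nil_append]
    simp [pvLineC, (by decide : pvIdentStart ' ' = false), (by decide : pvIdentCont ' ' = false)]
  | cons ch rest ih =>
    intro j w acc
    simp only [List.cons_append, pvLineC]
    by_cases h : (if w = [] then pvIdentStart ch else pvIdentCont ch) = true
    · rw [if_pos h, if_pos h]; exact ih _ _ _
    · rw [if_neg h, if_neg h]; exact ih _ _ _

theorem pvLineC_single_space (li lj : Int) : pvLineC li lj [' '] 0 [] [] = [] := by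
  simp [pvLineC, (by decide : pvIdentStart ' ' = false)]

theorem pvLineAgo (ij : Int × Int) (rest : List Char) : ∀ (j0 : Int) (w : List Char) (jst : Int)
    (acc : List (String × (Int × Int))),
    (w = [] ∨ pvIsIdentifier w = true) → (w ≠ [] → jst = j0 - 1) →
    (let st := (PySem.List.enumerate rest j0).foldl (pvLineAstep ij) (w, jst, acc)
     if st.1 ≠ [] then
       st.2.2 ++ [(String.ofList st.1, pvAdvanceJ ij (st.2.1 - st.1.length + 1))]
     else st.2.2)
    = pvLineC ij.1 ij.2 rest j0 w acc := by
  induction rest with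
  | nil =>
    intro j0 w jst acc hw hj
    simp only [PySem.List.enumerate_nil, List.foldl_nil, pvLineC]
    by_cases hwe : w = []
    · simp [hwe]
    · have hj' := hj hwe
      have hval : pvAdvanceJ ij (jst - (w.length : Int) + 1) = (ij.1, ij.2 + j0 - (w.length : Int)) := by
        subst hj'
        simp only [pvAdvanceJ, Prod.mk.injEq]
        exact ⟨by trivial, by ring⟩
      simp only [ne_eq, hwe, not_false_eq_true, if_true, hval]
  | cons ch rest ih =>
    intro j0 w jst acc hw hj
    rw [PySem.List.enumerate_cons, List.foldl_cons]
    by_cases hc : (if w = [] then pvIdentStart ch else pvIdentCont ch) = true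
    · have hstep : pvLineAstep ij (w, jst, acc) (j0, ch) = (w ++ [ch], j0, acc) := by
        simp only [pvLineAstep, pvIdentStep w ch hw, hc, if_true]
      rw [hstep]
      have hid : pvIsIdentifier (w ++ [ch]) = true := by rw [pvIdentStep w ch hw]; exact hc
      have := ih (j0 + 1) (w ++ [ch]) j0 acc (Or.inr hid) (by intro _; ring)
      rw [this]
      simp only [pvLineC, hc, if_true]
    · have hcf : (if w = [] then pvIdentStart ch else pvIdentCont ch) = false := by
        simpa using hc
      by_cases hwe : w = []
      · subst hwe
        have hsf : pvIdentStart ch = false := by simpa using hcf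
        have hstep : pvLineAstep ij ([], jst, acc) (j0, ch) = ([], j0, acc) := by
          simp only [pvLineAstep, pvIdentStep [] ch (Or.inl rfl)]
          simp [hsf]
        rw [hstep]
        have := ih (j0 + 1) [] j0 acc (Or.inl rfl) (by intro h; exact absurd rfl h)
        rw [this]
        simp only [pvLineC]
        simp [hsf]
      · have hstep : pvLineAstep ij (w, jst, acc) (j0, ch)
            = ([], j0, acc ++ [(String.ofList w, pvAdvanceJ ij (j0 - w.length))]) := by
          simp only [pvLineAstep, pvIdentStep w ch hw, hcf]
          simp [hwe]
        rw [hstep]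
        have := ih (j0 + 1) [] j0 (acc ++ [(String.ofList w, pvAdvanceJ ij (j0 - w.length))])
          (Or.inl rfl) (by intro h; exact absurd rfl h)
        rw [this]
        simp only [pvLineC, hcf]
        have hval : pvAdvanceJ ij (j0 - (w.length : Int)) = (ij.1, ij.2 + j0 - (w.length : Int)) := by
          simp only [pvAdvanceJ, Prod.mk.injEq]
          exact ⟨by trivial, by ring⟩
        simp only [ne_eq, hwe, not_false_eq_true, if_true, hval]
        simp

theorem pvLineA_eq_lineC (ij : Int × Int) (l : List Char) (acc : List (String × (Int × Int))) :
    pvLineA l ij acc = pvLineC ij.1 ij.2 l 0 [] acc := by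
  have := pvLineAgo ij l 0 [] 0 acc (Or.inl rfl) (by intro h; exact absurd rfl h)
  simpa [pvLineA] using this

theorem pvLineBgo (l : List Char) (li lj : Int) :
    ∀ (d n : Nat), l.length - n = d → n ≤ l.length →
    ∀ (ws : Int) (W : List Char) (acc : List (String × (Int × Int))),
    ((ws = -1 ∧ W = []) ∨ (∃ k : Nat, ws = (k : Int) ∧ k < n ∧ W = (l.drop k).take (n - k))) →
    (let st := (PySem.List.enumerate (l.drop n) (n : Int)).foldl (pvLineBstep l li lj) (ws, acc)
     if 0 ≤ st.1 then
       st.2 ++ [(String.ofList (PySem.List.slice l (some st.1) none), (li, lj + st.1))]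
     else st.2)
    = pvLineC li lj (l.drop n) (n : Int) W acc := by
  intro d
  induction d with
  | zero =>
    intro n hd hn ws W acc hws
    have hnl : n = l.length := by omega
    subst hnl
    rw [List.drop_length]
    simp only [PySem.List.enumerate_nil, List.foldl_nil, pvLineC]
    rcases hws with ⟨h1, h2⟩ | ⟨k, hk, hkn, hW⟩
    · subst h1; subst h2
      rw [if_neg (by omega : ¬ ((0:Int) ≤ -1))]
      simp
    · subst hk
      have hwdrop : W = l.drop k := by
        rw [hW]
        apply List.take_of_length_le
        simp [List.length_drop]
      rw [if_pos (by omega : (0:Int) ≤ (k:Int))]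
      have hne : W ≠ [] := by
        rw [hwdrop, ne_eq, List.drop_eq_nil_iff]; omega
      rw [if_pos hne]
      rw [PySem.List.slice_from_natCast, ← hwdrop]
      have hlen2 : (W.length : Int) = (l.length : Int) - (k : Int) := by
        rw [hwdrop]; simp [List.length_drop]; omega
      have hpos : ((li, lj + (k:Int)) : Int × Int) = (li, lj + (l.length:Int) - (W.length : Int)) := by
        rw [hlen2, Prod.mk.injEq]
        exact ⟨by trivial, by ring⟩
      rw [hpos]
  | succ d ihd =>
    intro n hd hn ws W acc hws
    have hnlt : n < l.length := by omega
    have hdrop : l.drop n = l[n] :: l.drop (n + 1) := List.drop_eq_getElem_cons hnlt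
    rw [hdrop, PySem.List.enumerate_cons, List.foldl_cons]
    have hcast : ((n:Int) + 1) = ((n + 1 : Nat) : Int) := by push_cast; ring
    rcases hws with ⟨hws1, hW⟩ | ⟨k, hk, hkn, hW⟩
    · subst hws1; subst hW
      by_cases hs : pvIdentStart l[n] = true
      · have hstep : pvLineBstep l li lj (-1, acc) ((n:Int), l[n]) = ((n:Int), acc) := by
          simp only [pvLineBstep]
          rw [if_neg (by omega : ¬ ((0:Int) ≤ -1)), if_pos hs, if_pos (by omega : (-1:Int) < 0)]
        rw [hstep, hcast]
        have hW1 : [l[n]] = (l.drop n).take (n + 1 - n) := by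
          rw [show n + 1 - n = 1 by omega, hdrop]
          rfl
        rw [ihd (n+1) (by omega) (by omega) ((n:Int)) [l[n]] acc (Or.inr ⟨n, rfl, by omega, hW1⟩)]
        simp only [pvLineC]
        simp [hs]
      · have hsf : pvIdentStart l[n] = false := by simpa using hs
        have hstep : pvLineBstep l li lj (-1, acc) ((n:Int), l[n]) = (-1, acc) := by
          simp only [pvLineBstep]
          rw [if_neg (by omega : ¬ ((0:Int) ≤ -1)), hsf]
          simp only [Bool.false_eq_true, if_false]
          rw [if_neg (by omega : ¬ ((0:Int) ≤ -1))]
        rw [hstep, hcast]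
        rw [ihd (n+1) (by omega) (by omega) (-1) [] acc (Or.inl ⟨rfl, rfl⟩)]
        simp only [pvLineC]
        simp [hsf]
    · subst hk; subst hW
      have h0k : (0:Int) ≤ (k:Int) := by omega
      have hwlen : ((l.drop k).take (n - k)).length = n - k := by
        simp [List.length_take, List.length_drop]
        omega
      have hwne : (l.drop k).take (n - k) ≠ [] := by
        intro hcon
        rw [hcon] at hwlen
        simp at hwlen
        omega
      by_cases hcont : pvIdentCont l[n] = true
      · have hstep : pvLineBstep l li lj ((k:Int), acc) ((n:Int), l[n]) = ((k:Int), acc) := by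
          simp only [pvLineBstep]
          rw [if_pos h0k, if_pos hcont, if_neg (by omega : ¬ ((k:Int) < 0))]
        rw [hstep, hcast]
        have hW1 : (l.drop k).take (n - k) ++ [l[n]] = (l.drop k).take (n + 1 - k) := by
          rw [show n + 1 - k = (n - k) + 1 by omega, List.take_add_one]
          rw [List.getElem?_drop, show k + (n - k) = n by omega, List.getElem?_eq_getElem hnlt]
          rfl
        rw [ihd (n+1) (by omega) (by omega) ((k:Int)) ((l.drop k).take (n + 1 - k)) acc
            (Or.inr ⟨k, rfl, by omega, rfl⟩)]
        simp only [pvLineC]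
        simp [hwne, hcont, hW1]
      · have hcf : pvIdentCont l[n] = false := by simpa using hcont
        have hstep : pvLineBstep l li lj ((k:Int), acc) ((n:Int), l[n])
            = (-1, acc ++ [(String.ofList (PySem.List.slice l (some (k:Int)) (some (n:Int))),
                (li, lj + (k:Int)))]) := by
          simp only [pvLineBstep]
          rw [if_pos h0k, hcf]
          simp only [Bool.false_eq_true, if_false]
          rw [if_pos h0k]
        rw [hstep, hcast]
        rw [ihd (n+1) (by omega) (by omega) (-1) [] _ (Or.inl ⟨rfl, rfl⟩)]
        simp only [pvLineC]
        rw [if_neg (by simp [hwne, hcf] :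
          ¬ ((if (l.drop k).take (n - k) = [] then pvIdentStart l[n] else pvIdentCont l[n]) = true))]
        rw [if_pos hwne]
        rw [PySem.List.slice_natCast]
        rw [show (lj + (n:Int) - (((l.drop k).take (n - k)).length : Int)) = lj + (k:Int) from by
          rw [hwlen]; omega]
        rw [hcast]

theorem pvLineB_eq_lineC (l : List Char) (li lj : Int) (acc : List (String × (Int × Int))) :
    pvLineB l li lj acc = pvLineC li lj l 0 [] acc := by
  have := pvLineBgo l li lj l.length 0 (by omega) (by omega) (-1) [] acc (Or.inl ⟨rfl, rfl⟩)
  simpa [pvLineB] using this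

-- clean equations for PySem.Chars.splitlines.go
theorem pvGo_nil (isB : Char → Bool) (cur : List Char) (acc : List (List Char)) :
    PySem.Chars.splitlines.go isB [] cur acc
      = if cur.isEmpty then acc.reverse else (cur.reverse :: acc).reverse := by
  rw [PySem.Chars.splitlines.go.eq_def]

theorem pvGo_crlf (isB : Char → Bool) (rest cur : List Char) (acc : List (List Char)) :
    PySem.Chars.splitlines.go isB ('\r'::'\n'::rest) cur acc
      = PySem.Chars.splitlines.go isB rest [] (cur.reverse :: acc) := by
  rw [PySem.Chars.splitlines.go.eq_def]
  rfl

theorem pvGo_cons (isB : Char → Bool) (c : Char) (rest cur : List Char) (acc : List (List Char))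
    (h : ¬(c = '\r' ∧ ∃ r, rest = '\n' :: r)) :
    PySem.Chars.splitlines.go isB (c :: rest) cur acc
      = if isB c then PySem.Chars.splitlines.go isB rest [] (cur.reverse :: acc)
        else PySem.Chars.splitlines.go isB rest (c :: cur) acc := by
  rw [PySem.Chars.splitlines.go.eq_def]
  split <;> simp_all

theorem pvTokLines_snoc (L : List (List Char)) (x : List Char) (ij : Int × Int) :
    pvTokLines (L ++ [x]) ij
      = pvTokLines L ij
        ++ pvLineC (pvAdvanceI ij (L.length : Int)).1 (pvAdvanceI ij (L.length : Int)).2 x 0 [] [] := by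
  unfold pvTokLines
  rw [PySem.List.enumerate_append, List.flatMap_append]
  simp [PySem.List.enumerate_cons, PySem.List.enumerate_nil]

theorem pvTokLines_space_nil (isB : Char → Bool) (hsp : isB ' ' = false)
    (cur : List Char) (acc0 : List (List Char)) (ij : Int × Int) :
    pvTokLines (PySem.Chars.splitlines.go isB ([] ++ [' ']) cur acc0) ij
      = pvTokLines (PySem.Chars.splitlines.go isB [] cur acc0) ij := by
  rw [List.nil_append]
  rw [pvGo_cons isB ' ' [] cur acc0 (by rintro ⟨_, r, hr⟩; simp at hr)]
  rw [hsp]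
  simp only [Bool.false_eq_true, if_false]
  rw [pvGo_nil, pvGo_nil]
  simp only [List.isEmpty_cons, Bool.false_eq_true, if_false, List.reverse_cons]
  by_cases hcur : cur = []
  · subst hcur
    simp only [List.isEmpty_nil, if_true, List.reverse_nil, List.nil_append]
    rw [pvTokLines_snoc]
    simp [pvLineC_single_space]
  · rw [if_neg (by simpa using hcur)]
    rw [pvTokLines_snoc, pvTokLines_snoc]
    congr 1
    exact pvLineC_space _ _ _ _ _ _

theorem pvTokLines_space (isB : Char → Bool) (hsp : isB ' ' = false) :
    ∀ (n : Nat) (s cur : List Char) (acc0 : List (List Char)) (ij : Int × Int), s.length ≤ n →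
    pvTokLines (PySem.Chars.splitlines.go isB (s ++ [' ']) cur acc0) ij
      = pvTokLines (PySem.Chars.splitlines.go isB s cur acc0) ij := by
  intro n
  induction n with
  | zero =>
    intro s cur acc0 ij hlen
    have hs : s = [] := by
      cases s with
      | nil => rfl
      | cons a b => simp at hlen
    subst hs
    exact pvTokLines_space_nil isB hsp cur acc0 ij
  | succ n ih =>
    intro s cur acc0 ij hlen
    rcases s with _ | ⟨c, t⟩
    · exact pvTokLines_space_nil isB hsp cur acc0 ij
    · rcases t with _ | ⟨d, t'⟩
      · rw [show ([c] ++ [' ']) = c :: [' '] from rfl]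
        rw [pvGo_cons isB c [' '] cur acc0 (by rintro ⟨_, r, hr⟩; simp at hr)]
        rw [pvGo_cons isB c [] cur acc0 (by rintro ⟨_, r, hr⟩; simp at hr)]
        by_cases hc : isB c = true
        · rw [hc]
          simp only [if_true]
          exact ih [] [] (cur.reverse :: acc0) ij (by simp)
        · rw [(by simpa using hc : isB c = false)]
          simp only [Bool.false_eq_true, if_false]
          exact ih [] (c :: cur) acc0 ij (by simp)
      · by_cases hcd : c = '\r' ∧ d = '\n'
        · obtain ⟨hc1, hd1⟩ := hcd
          subst hc1; subst hd1
          rw [show (('\r'::'\n'::t') ++ [' ']) = '\r'::'\n'::(t' ++ [' ']) from rfl]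
          rw [pvGo_crlf, pvGo_crlf]
          exact ih t' [] (cur.reverse :: acc0) ij (by simp at hlen ⊢; omega)
        · have hne : ¬(c = '\r' ∧ ∃ r, (d :: t') = '\n' :: r) := by
            rintro ⟨hc1, r, hr⟩
            exact hcd ⟨hc1, (List.cons.injEq _ _ _ _).mp hr |>.1⟩
          have hne2 : ¬(c = '\r' ∧ ∃ r, (d :: (t' ++ [' '])) = '\n' :: r) := by
            rintro ⟨hc1, r, hr⟩
            exact hcd ⟨hc1, (List.cons.injEq _ _ _ _).mp hr |>.1⟩
          rw [show ((c::d::t') ++ [' ']) = c :: (d :: (t' ++ [' '])) from rfl]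
          rw [pvGo_cons isB c (d :: (t' ++ [' '])) cur acc0 hne2]
          rw [pvGo_cons isB c (d :: t') cur acc0 hne]
          by_cases hc : isB c = true
          · rw [hc]
            simp only [if_true]
            have := ih (d :: t') [] (cur.reverse :: acc0) ij (by simp at hlen ⊢; omega)
            simpa using this
          · rw [(by simpa using hc : isB c = false)]
            simp only [Bool.false_eq_true, if_false]
            have := ih (d :: t') (c :: cur) acc0 ij (by simp at hlen ⊢; omega)
            simpa using this

-- splitlines(x + " ") has the same identifier tokens as splitlines(x)
theorem pvSplitSpaceTok (x : List Char) (ij : Int × Int) :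
    pvTokLines (PySem.Chars.splitlines (x ++ [' '])) ij
      = pvTokLines (PySem.Chars.splitlines x) ij := by
  simp only [PySem.Chars.splitlines]
  exact pvTokLines_space _ (by decide) x.length x [] [] ij le_rfl

theorem pvFlatMap_flatMap {α β γ : Type} (l : List α) (f : α → List β) (g : β → List γ) :
    (l.flatMap f).flatMap g = l.flatMap (fun a => (f a).flatMap g) := by
  induction l with
  | nil => simp
  | cons x xs ih => simp [List.flatMap_cons, List.flatMap_append, ih]

theorem pvSegTokB_eq (seg : List Char) (ij : Int × Int) (acc : List (String × (Int × Int))) :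
    pvSegTokB seg ij acc = acc ++ pvTokLines (PySem.Chars.splitlines seg) ij := by
  unfold pvSegTokB pvTokLines
  have hbody : (fun (acc : List (String × (Int × Int))) (il : Int × List Char) =>
        let lilj := if il.1 ≠ 0 then (ij.1 + il.1, (1 : Int)) else ij
        pvLineB il.2 lilj.1 lilj.2 acc)
      = fun acc il => acc ++ pvLineC (pvAdvanceI ij il.1).1 (pvAdvanceI ij il.1).2 il.2 0 [] [] := by
    funext acc il
    show pvLineB il.2 (pvAdvanceI ij il.1).1 (pvAdvanceI ij il.1).2 acc = _
    rw [pvLineB_eq_lineC]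
    conv_lhs => rw [show acc = acc ++ ([] : List (String × (Int × Int))) from (List.append_nil acc).symm]
    rw [pvLineC_acc]
  rw [hbody, PySem.List.foldl_append_eq_flatMap]

theorem pvAmain (c : String) :
    identifier_tokens c
      = (pvRemoveCommentsSeg c.toList (c.toList.length + 1) 0 (1, 1)).flatMap
          (fun sij => pvTokLines (PySem.Chars.splitlines sij.1) sij.2) := by
  unfold identifier_tokens
  rw [show (fun (acc : List (String × (Int × Int))) (lij : List Char × (Int × Int)) =>
        pvLineA lij.1 lij.2 acc)
      = fun acc lij => acc ++ pvLineC lij.2.1 lij.2.2 lij.1 0 [] [] from by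
    funext acc lij
    rw [pvLineA_eq_lineC]
    conv_lhs => rw [show acc = acc ++ ([] : List (String × (Int × Int))) from (List.append_nil acc).symm]
    rw [pvLineC_acc]]
  rw [PySem.List.foldl_append_eq_flatMap]
  rw [List.nil_append]
  unfold pvSplitLinesSeg
  rw [pvFlatMap_flatMap]
  congr 1
  funext sij
  rw [List.flatMap_map]
  rfl

-- findFrom facts (with minimality of the found index)
theorem pvFindSpec (cs sub : List Char) (k : Nat) (hk : k ≤ cs.length) (hsub : sub ≠ [])
    (h : PySem.Chars.findFrom cs sub (k : Int) ≠ -1) :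
    ∃ r : Nat, PySem.Chars.findFrom cs sub (k : Int) = (r : Int) ∧ k ≤ r ∧ sub <+: cs.drop r
      ∧ r + sub.length ≤ cs.length ∧ ∀ i, k ≤ i → i < r → ¬ sub <+: cs.drop i := by
  obtain ⟨h1, h2, h3⟩ := PySem.Chars.findFrom_natCast_spec cs sub k hk h
  have hlt : (PySem.Chars.findFrom cs sub (k : Int)).toNat < cs.length := by
    by_contra hge
    rw [List.drop_eq_nil_iff.mpr (by omega)] at h2
    exact hsub (List.prefix_nil.mp h2)
  have hplen := h2.length_le
  rw [List.length_drop] at hplen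
  exact ⟨(PySem.Chars.findFrom cs sub (k : Int)).toNat, by omega, by omega, h2, by omega, h3⟩

theorem pvNotBoth (cs : List Char) (r : Nat)
    (h1 : ['/','*'] <+: cs.drop r) (h2 : ['/','/'] <+: cs.drop r) : False := by
  obtain ⟨t1, ht1⟩ := h1
  obtain ⟨t2, ht2⟩ := h2
  have := ht1.trans ht2.symm
  simp at this

theorem pvInfixOfPrefixDrop (cs sub : List Char) (j m : Nat) (hjm : j ≤ m)
    (h : sub <+: cs.drop m) : sub <:+: cs.drop j := by
  have hd : cs.drop m = (cs.drop j).drop (m - j) := by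
    rw [List.drop_drop]; congr 1; omega
  rw [hd] at h
  exact h.isInfix.trans (List.drop_suffix _ _).isInfix

theorem pvNoPrefixAt (cs sub : List Char) (k : Nat) (h : ¬ sub <:+: cs.drop k) :
    ∀ j, k ≤ j → ¬ sub <+: cs.drop j :=
  fun j hj hp => h (pvInfixOfPrefixDrop cs sub k j hj hp)

-- DFA step lemmas
theorem pvStepCode (s : List Char)
    (h : ¬ ['/','*'] <+: s ∧ ¬ ['/','/'] <+: s) :
    pvCommentOk 0 s = pvCommentOk 0 (s.drop 1) := by
  obtain ⟨hb, hl⟩ := h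
  match s with
  | [] => rfl
  | [a] =>
    by_cases ha : a = '/' <;> simp [pvCommentOk, pvCommentStep, ha]
  | a :: b :: r =>
    by_cases ha : a = '/'
    · subst ha
      have hbne : b ≠ '*' := by
        intro hb'; subst hb'; exact hb ⟨r, rfl⟩
      have hlne : b ≠ '/' := by
        intro hl'; subst hl'; exact hl ⟨r, rfl⟩
      simp [pvCommentOk, pvCommentStep, hbne, hlne]
    · simp [pvCommentOk, pvCommentStep, ha]

theorem pvStepBlock (s : List Char) (h : ¬ ['*','/'] <+: s) :
    pvCommentOk 3 s = pvCommentOk 3 (s.drop 1) := by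
  match s with
  | [] => rfl
  | [a] =>
    by_cases ha : a = '*' <;> simp [pvCommentOk, pvCommentStep, ha]
  | a :: b :: r =>
    by_cases ha : a = '*'
    · subst ha
      have hbne : b ≠ '/' := by
        intro hb'; subst hb'; exact h ⟨r, rfl⟩
      by_cases hb2 : b = '*' <;> simp [pvCommentOk, pvCommentStep, hbne, hb2]
    · simp [pvCommentOk, pvCommentStep, ha]

theorem pvStepLine (s : List Char) (h : ¬ ['\n'] <+: s) :
    pvCommentOk 2 s = pvCommentOk 2 (s.drop 1) := by
  match s with
  | [] => rfl
  | a :: r =>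
    have ha : a ≠ '\n' := by
      intro ha'; subst ha'; exact h ⟨r, rfl⟩
    simp [pvCommentOk, pvCommentStep, ha]

theorem pvEnterBlock (s : List Char) (h : ['/','*'] <+: s) :
    pvCommentOk 0 s = pvCommentOk 3 (s.drop 2) := by
  obtain ⟨t, ht⟩ := h
  subst ht
  simp [pvCommentOk, pvCommentStep]

theorem pvEnterLine (s : List Char) (h : ['/','/'] <+: s) :
    pvCommentOk 0 s = pvCommentOk 2 (s.drop 2) := by
  obtain ⟨t, ht⟩ := h
  subst ht
  simp [pvCommentOk, pvCommentStep]

theorem pvExitBlock (s : List Char) (h : ['*','/'] <+: s) :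
    pvCommentOk 3 s = pvCommentOk 0 (s.drop 2) := by
  obtain ⟨t, ht⟩ := h
  subst ht
  simp [pvCommentOk, pvCommentStep]

theorem pvLineNl (s : List Char) (h : ['\n'] <+: s) :
    pvCommentOk 2 s = pvCommentOk 0 (s.drop 1) := by
  obtain ⟨t, ht⟩ := h
  subst ht
  simp [pvCommentOk, pvCommentStep]

theorem pvCodeNl (s : List Char) (h : ['\n'] <+: s) :
    pvCommentOk 0 s = pvCommentOk 0 (s.drop 1) := by
  obtain ⟨t, ht⟩ := h
  subst ht
  simp [pvCommentOk, pvCommentStep]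

-- generic skip: a state is preserved along characters where nothing happens
theorem pvSkipTo (F : List Char → Bool) (P : List Char → Prop)
    (hstep : ∀ s : List Char, ¬ P s → F s = F (s.drop 1)) (cs : List Char) :
    ∀ (d k r : Nat), r - k = d → k ≤ r →
    (∀ j, k ≤ j → j < r → ¬ P (cs.drop j)) → F (cs.drop k) = F (cs.drop r) := by
  intro d
  induction d with
  | zero =>
    intro k r hd hkr h
    have : k = r := by omega
    subst this
    rfl
  | succ d ih =>
    intro k r hd hkr h
    have hkr' : k < r := by omega
    have h1 := hstep (cs.drop k) (h k le_rfl hkr')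
    rw [List.drop_drop] at h1
    rw [h1]
    exact ih (k+1) r (by omega) (by omega) (fun j hj1 hj2 => h j (by omega) hj2)

theorem pvOkSkip (cs : List Char) (k r : Nat) (hkr : k ≤ r)
    (hb : ∀ i, k ≤ i → i < r → ¬ ['/','*'] <+: cs.drop i)
    (hl : ∀ i, k ≤ i → i < r → ¬ ['/','/'] <+: cs.drop i) :
    pvCommentOk 0 (cs.drop k) = pvCommentOk 0 (cs.drop r) :=
  pvSkipTo (pvCommentOk 0) (fun s => ['/','*'] <+: s ∨ ['/','/'] <+: s)
    (fun s hs => pvStepCode s ⟨fun h => hs (Or.inl h), fun h => hs (Or.inr h)⟩)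
    cs (r - k) k r rfl hkr
    (fun j hj1 hj2 h => h.elim (hb j hj1 hj2) (hl j hj1 hj2))

theorem pvBlockSkip (cs : List Char) (k r : Nat) (hkr : k ≤ r)
    (h : ∀ i, k ≤ i → i < r → ¬ ['*','/'] <+: cs.drop i) :
    pvCommentOk 3 (cs.drop k) = pvCommentOk 3 (cs.drop r) :=
  pvSkipTo (pvCommentOk 3) (fun s => ['*','/'] <+: s) pvStepBlock cs (r - k) k r rfl hkr h

theorem pvLineSkip (cs : List Char) (k r : Nat) (hkr : k ≤ r)
    (h : ∀ i, k ≤ i → i < r → ¬ ['\n'] <+: cs.drop i) :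
    pvCommentOk 2 (cs.drop k) = pvCommentOk 2 (cs.drop r) :=
  pvSkipTo (pvCommentOk 2) (fun s => ['\n'] <+: s) pvStepLine cs (r - k) k r rfl hkr h

-- inside a block comment with no "*/" ahead, the DFA rejects
theorem pvBlockNoClose (cs : List Char) (k : Nat) (hk : k ≤ cs.length)
    (h : ∀ j, k ≤ j → ¬ ['*','/'] <+: cs.drop j) :
    pvCommentOk 3 (cs.drop k) = false := by
  rw [pvBlockSkip cs k cs.length hk (fun i hi _ => h i hi)]
  rw [List.drop_length]
  rfl

-- continuation facts used by the main induction: after a reached "/*" (in a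
-- string the DFA accepts) there IS a "*/", and the DFA accepts from after it
theorem pvBlockCont (cs : List Char) (rb : Nat) (hlen : rb + 2 ≤ cs.length)
    (hpref : ['/','*'] <+: cs.drop rb) (hok : pvCommentOk 0 (cs.drop rb) = true) :
    ∃ re : Nat, PySem.Chars.findFrom cs ['*','/'] (((rb + 2 : Nat)) : Int) = (re : Int) ∧
      rb + 2 ≤ re ∧ re + 2 ≤ cs.length ∧ pvCommentOk 0 (cs.drop (re + 2)) = true := by
  have hokB : pvCommentOk 3 (cs.drop (rb + 2)) = true := by
    have := pvEnterBlock (cs.drop rb) hpref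
    rw [List.drop_drop] at this
    rw [← this]; exact hok
  have hne : PySem.Chars.findFrom cs ['*','/'] (((rb + 2 : Nat)) : Int) ≠ -1 := by
    rw [ne_eq, PySem.Chars.findFrom_natCast_eq_neg_one_iff cs ['*','/'] (rb + 2) hlen]
    intro hno
    have := pvBlockNoClose cs (rb + 2) hlen (pvNoPrefixAt cs ['*','/'] (rb + 2) hno)
    rw [hokB] at this
    simp at this
  obtain ⟨re, hre, hkre, hprefe, hlene0, hmine⟩ :=
    pvFindSpec cs ['*','/'] (rb + 2) hlen (by simp) hne
  have hlene : re + 2 ≤ cs.length := by simpa using hlene0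
  refine ⟨re, hre, hkre, hlene, ?_⟩
  have hchain : pvCommentOk 3 (cs.drop (rb + 2)) = pvCommentOk 0 (cs.drop (re + 2)) := by
    rw [pvBlockSkip cs (rb + 2) re hkre hmine]
    have := pvExitBlock (cs.drop re) hprefe
    rw [List.drop_drop] at this
    exact this
  rw [← hchain]
  exact hokB

-- after a reached "//" ending at a newline at index rn, the DFA accepts from rn
theorem pvLineCont (cs : List Char) (rl rn : Nat) (hlen : rl + 2 ≤ cs.length)
    (hpref : ['/','/'] <+: cs.drop rl) (hok : pvCommentOk 0 (cs.drop rl) = true)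
    (hkrn : rl + 2 ≤ rn) (hprefn : ['\n'] <+: cs.drop rn)
    (hmin : ∀ i, rl + 2 ≤ i → i < rn → ¬ ['\n'] <+: cs.drop i) :
    pvCommentOk 0 (cs.drop rn) = true := by
  have hokL : pvCommentOk 2 (cs.drop (rl + 2)) = true := by
    have := pvEnterLine (cs.drop rl) hpref
    rw [List.drop_drop] at this
    rw [← this]; exact hok
  have h1 : pvCommentOk 2 (cs.drop (rl + 2)) = pvCommentOk 2 (cs.drop rn) :=
    pvLineSkip cs (rl + 2) rn hkrn hmin
  have h2 : pvCommentOk 2 (cs.drop rn) = pvCommentOk 0 (cs.drop (rn + 1)) := by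
    have := pvLineNl (cs.drop rn) hprefn
    rw [List.drop_drop] at this
    exact this
  have h3 : pvCommentOk 0 (cs.drop rn) = pvCommentOk 0 (cs.drop (rn + 1)) := by
    have := pvCodeNl (cs.drop rn) hprefn
    rw [List.drop_drop] at this
    exact this
  rw [h3, ← h2, ← h1]
  exact hokL

theorem pvMain_eq (cs : List Char) :
    ∀ (fuel k : Nat) (ij : Int × Int) (acc : List (String × (Int × Int))), k ≤ cs.length →
      pvCommentOk 0 (cs.drop k) = true →
      pvLoopB cs fuel (k : Int) ij acc
        = acc ++ (pvRemoveCommentsSeg cs fuel (k : Int) ij).flatMap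
            (fun sij => pvTokLines (PySem.Chars.splitlines sij.1) sij.2) := by
  intro fuel
  induction fuel with
  | zero =>
    intro k ij acc hk hok
    simp [pvLoopB, pvRemoveCommentsSeg]
  | succ fuel ih =>
    intro k ij acc hk hok
    have hfn : pvFindNext cs ((k : Nat) : Int) [['/','*'], ['/','/']]
        = (if PySem.Chars.findFrom cs ['/','/'] (k : Int) = -1 then
             (if PySem.Chars.findFrom cs ['/','*'] (k : Int) = -1 then
                ((-1 : Int), (none : Option (List Char)))
              else (PySem.Chars.findFrom cs ['/','*'] (k : Int), some ['/','*']))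
           else if PySem.Chars.findFrom cs ['/','*'] (k : Int) = -1 then
             (PySem.Chars.findFrom cs ['/','/'] (k : Int), some ['/','/'])
           else if PySem.Chars.findFrom cs ['/','/'] (k : Int)
               < PySem.Chars.findFrom cs ['/','*'] (k : Int) then
             (PySem.Chars.findFrom cs ['/','/'] (k : Int), some ['/','/'])
           else (PySem.Chars.findFrom cs ['/','*'] (k : Int), some ['/','*'])) := by
      simp only [pvFindNext, List.foldl_cons, List.foldl_nil]
      by_cases h1 : PySem.Chars.findFrom cs ['/','*'] (k : Int) = -1 <;>
        by_cases h2 : PySem.Chars.findFrom cs ['/','/'] (k : Int) = -1 <;>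
          simp [h1, h2]
    by_cases h2 : PySem.Chars.findFrom cs ['/','/'] (k : Int) = -1 <;>
      by_cases h1 : PySem.Chars.findFrom cs ['/','*'] (k : Int) = -1
    · -- no comment found: final segment
      simp only [pvLoopB, pvRemoveCommentsSeg, hfn]
      simp [h1, h2, pvSegTokB_eq]
    · -- block comment next (fl = -1, fb found)
      obtain ⟨rb, hrb, hkrb, hprefb, hlenb0, hminb⟩ := pvFindSpec cs ['/','*'] k hk (by simp) h1
      have hlenb : rb + 2 ≤ cs.length := by simpa using hlenb0
      have hnoL := pvNoPrefixAt cs ['/','/'] k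
        ((PySem.Chars.findFrom_natCast_eq_neg_one_iff cs ['/','/'] k hk).mp h2)
      have hokRb : pvCommentOk 0 (cs.drop rb) = true := by
        rw [← pvOkSkip cs k rb hkrb hminb (fun i hi _ => hnoL i hi)]
        exact hok
      obtain ⟨re, hre, hkre, hlene, hokNext⟩ := pvBlockCont cs rb hlenb hprefb hokRb
      have hble : PySem.Chars.findFrom cs ['*','/'] ((rb : Int) + 2) ≠ -1 := by
        rw [show ((rb : Int) + 2) = ((rb + 2 : Nat) : Int) by push_cast; ring, hre]; omega
      have hre' : PySem.Chars.findFrom cs ['*','/'] ((rb : Int) + 2) = (re : Int) := by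
        rw [show ((rb : Int) + 2) = ((rb + 2 : Nat) : Int) by push_cast; ring]; exact hre
      have ihE := fun (ij' : Int × Int) (acc' : List (String × (Int × Int))) => by
        have h := ih (re + 2) ij' acc' (by omega) hokNext; push_cast at h; exact h
      simp only [pvLoopB, pvRemoveCommentsSeg, hfn]
      simp [h1, h2, hrb, hble, hre', ihE, pvSegTokB_eq, pvSplitSpaceTok,
        List.flatMap_cons, List.append_assoc]
    · -- line comment next (fl found, fb = -1)
      obtain ⟨rl, hrl, hkrl, hprefl, hlenl0, hminl⟩ := pvFindSpec cs ['/','/'] k hk (by simp) h2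
      have hlenl : rl + 2 ≤ cs.length := by simpa using hlenl0
      have hnoB := pvNoPrefixAt cs ['/','*'] k
        ((PySem.Chars.findFrom_natCast_eq_neg_one_iff cs ['/','*'] k hk).mp h1)
      have hokRl : pvCommentOk 0 (cs.drop rl) = true := by
        rw [← pvOkSkip cs k rl hkrl (fun i hi _ => hnoB i hi) hminl]
        exact hok
      have hbr : ((rl : Int) + 2) = ((rl + 2 : Nat) : Int) := by push_cast; ring
      by_cases he : PySem.Chars.findFrom cs ['\n'] (((rl + 2 : Nat)) : Int) = -1
      · have he' : PySem.Chars.findFrom cs ['\n'] ((rl : Int) + 2) = -1 := by rw [hbr]; exact he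
        have hokEnd : pvCommentOk 0 (cs.drop cs.length) = true := by
          rw [List.drop_length]; rfl
        have ihE := fun (ij' : Int × Int) acc' => ih cs.length ij' acc' le_rfl hokEnd
        simp only [pvLoopB, pvRemoveCommentsSeg, hfn]
        simp [h1, h2, hrl, he', ihE, pvSegTokB_eq, pvSplitSpaceTok,
          List.flatMap_cons, List.append_assoc]
      · obtain ⟨rn, hrn, hkrn, hprefn, hlenn0, hminn⟩ :=
          pvFindSpec cs ['\n'] (rl + 2) (by omega) (by simp) he
        have hlenn : rn + 1 ≤ cs.length := by simpa using hlenn0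
        have hrn' : PySem.Chars.findFrom cs ['\n'] ((rl : Int) + 2) = (rn : Int) := by
          rw [hbr]; exact hrn
        have hrnne : PySem.Chars.findFrom cs ['\n'] ((rl : Int) + 2) ≠ -1 := by
          rw [hrn']; omega
        have hokNext := pvLineCont cs rl rn hlenl hprefl hokRl hkrn hprefn hminn
        have ihE := fun (ij' : Int × Int) acc' => ih rn ij' acc' (by omega) hokNext
        simp only [pvLoopB, pvRemoveCommentsSeg, hfn]
        simp [h1, h2, hrl, hrnne, hrn', ihE, pvSegTokB_eq, pvSplitSpaceTok,
          List.flatMap_cons, List.append_assoc]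
    · -- both found: the earlier one wins (they can never be equal)
      obtain ⟨rb, hrb, hkrb, hprefb, hlenb0, hminb⟩ := pvFindSpec cs ['/','*'] k hk (by simp) h1
      have hlenb : rb + 2 ≤ cs.length := by simpa using hlenb0
      obtain ⟨rl, hrl, hkrl, hprefl, hlenl0, hminl⟩ := pvFindSpec cs ['/','/'] k hk (by simp) h2
      have hlenl : rl + 2 ≤ cs.length := by simpa using hlenl0
      have hnatne : rb ≠ rl := by
        intro hEq
        subst hEq
        exact pvNotBoth cs rb hprefb hprefl
      by_cases hlt : PySem.Chars.findFrom cs ['/','/'] (k : Int)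
          < PySem.Chars.findFrom cs ['/','*'] (k : Int)
      · -- line comment first
        have hltn : ((rl : Int)) < ((rb : Int)) := by rw [hrl, hrb] at hlt; exact hlt
        have hminn : min ((rb : Int)) ((rl : Int)) = ((rl : Int)) := by omega
        have hnen : ¬ (((rl : Int)) = ((rb : Int))) := by omega
        have hrlne : ¬ (((rl : Int)) = -1) := by omega
        have hrbne : ¬ (((rb : Int)) = -1) := by omega
        have hokRl : pvCommentOk 0 (cs.drop rl) = true := by
          rw [← pvOkSkip cs k rl hkrl (fun i hi hir => hminb i hi (by omega)) hminl]
          exact hok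
        have hbr : ((rl : Int) + 2) = ((rl + 2 : Nat) : Int) := by push_cast; ring
        by_cases he : PySem.Chars.findFrom cs ['\n'] (((rl + 2 : Nat)) : Int) = -1
        · have he' : PySem.Chars.findFrom cs ['\n'] ((rl : Int) + 2) = -1 := by rw [hbr]; exact he
          have hokEnd : pvCommentOk 0 (cs.drop cs.length) = true := by
            rw [List.drop_length]; rfl
          have ihE := fun (ij' : Int × Int) acc' => ih cs.length ij' acc' le_rfl hokEnd
          simp only [pvLoopB, pvRemoveCommentsSeg, hfn]
          simp [hrb, hrl, hltn, hminn, hnen, hrlne, hrbne, he', ihE, pvSegTokB_eq,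
            pvSplitSpaceTok, List.flatMap_cons, List.append_assoc]
        · obtain ⟨rn, hrn, hkrn, hprefn, hlenn0, hminnl⟩ :=
            pvFindSpec cs ['\n'] (rl + 2) (by omega) (by simp) he
          have hlenn : rn + 1 ≤ cs.length := by simpa using hlenn0
          have hrn' : PySem.Chars.findFrom cs ['\n'] ((rl : Int) + 2) = (rn : Int) := by
            rw [hbr]; exact hrn
          have hrnne : PySem.Chars.findFrom cs ['\n'] ((rl : Int) + 2) ≠ -1 := by
            rw [hrn']; omega
          have hokNext := pvLineCont cs rl rn hlenl hprefl hokRl hkrn hprefn hminnl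
          have ihE := fun (ij' : Int × Int) acc' => ih rn ij' acc' (by omega) hokNext
          simp only [pvLoopB, pvRemoveCommentsSeg, hfn]
          simp [hrb, hrl, hltn, hminn, hnen, hrlne, hrbne, hrnne, hrn', ihE, pvSegTokB_eq,
            pvSplitSpaceTok, List.flatMap_cons, List.append_assoc]
      · -- block comment first
        have hltb : ((rb : Int)) < ((rl : Int)) := by
          rw [hrl, hrb] at hlt
          omega
        have hnltn : ¬ (((rl : Int)) < ((rb : Int))) := by omega
        have hminn : min ((rb : Int)) ((rl : Int)) = ((rb : Int)) := by omega
        have hrlne : ¬ (((rl : Int)) = -1) := by omega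
        have hrbne : ¬ (((rb : Int)) = -1) := by omega
        have hokRb : pvCommentOk 0 (cs.drop rb) = true := by
          rw [← pvOkSkip cs k rb hkrb hminb (fun i hi hir => hminl i hi (by omega))]
          exact hok
        obtain ⟨re, hre, hkre, hlene, hokNext⟩ := pvBlockCont cs rb hlenb hprefb hokRb
        have hble : PySem.Chars.findFrom cs ['*','/'] ((rb : Int) + 2) ≠ -1 := by
          rw [show ((rb : Int) + 2) = ((rb + 2 : Nat) : Int) by push_cast; ring, hre]; omega
        have hre' : PySem.Chars.findFrom cs ['*','/'] ((rb : Int) + 2) = (re : Int) := by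
          rw [show ((rb : Int) + 2) = ((rb + 2 : Nat) : Int) by push_cast; ring]; exact hre
        have ihE := fun (ij' : Int × Int) (acc' : List (String × (Int × Int))) => by
          have h := ih (re + 2) ij' acc' (by omega) hokNext; push_cast at h; exact h
        simp only [pvLoopB, pvRemoveCommentsSeg, hfn]
        simp [hrb, hrl, hnltn, hminn, hrlne, hrbne, hble, hre', ihE, pvSegTokB_eq,
          pvSplitSpaceTok, List.flatMap_cons, List.append_assoc]

-- ===== VERDICT (by name: the statement is the Claim_ definition above) =====
theorem identifier_tokens_spec : Claim_equal_identifier_tokens := by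
  intro c hdom hpre
  unfold Spec_identifier_tokens
  unfold Pre_identifier_tokens at hpre
  rw [pvAmain]
  have h := pvMain_eq c.toList (c.toList.length + 1) 0 (1, 1) [] (by omega) (by simpa using hpre)
  simp only [Nat.cast_zero, List.nil_append] at h
  simp only [identifier_tokens_alt]
  exact h.symm
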